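-- pv_equiv track=rewrite | github.com/karimamd/Lexical-Analysis | NFA.py | addConcatenation
-- ===== SOURCE A (Python) =====
-- definitions = ["letter" , "digit" , "digits" ]
--
-- def isOperator(c):
--     operators = ['*','+','|','$']
--     return operators.count(c)
--
-- def isOperatorOrBracket(c):
--     operators = ['*','+','|','$','(',')']
--     return operators.count(c)
--
-- def addConcatenation(s):  # returns a list of items separated by expressions after adding $ as concatenation operator
--     cur = []
--     i = 0
--     # first divide them into separated items
--     while i < len(s) :
--         mx = i+1
--         for j in range(i+1,len(s)):
--             tmp = s[i:j+1]
--             if definitions.count(tmp):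
--                 mx = j+1
--
--         cur.append(s[i:mx])
--         i = mx
--
--     ret = [cur[0]]
--     # add $ if it's required
--     for i in range(1,len(cur)):
--         if  isOperator(ret[-1]) and isOperator(cur[i]):
--             ret.append('$')
--         elif cur[i] == '(' and ret[-1] != '|':
--             ret.append('$')
--         elif ret[-1] == ')' and isOperator(cur[i]) == 0 :
--             ret.append('$')
--         elif isOperatorOrBracket(ret[-1]) == 0 and isOperatorOrBracket(cur[i]) == 0:
--             ret.append('$')
--         elif (ret[-1] == '*' or ret[-1] == '+') and (cur[i] != '|' and cur[i] != ')'):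
--             ret.append('$')
--
--         ret.append(cur[i])
--
--     return ret
-- ===== SOURCE B (Python) =====
-- # B: single O(n) left-to-right pass - greedy longest-prefix tokenizer (no inner rescan)
-- # fused with a prev-token state machine deciding where the concatenation marker goes.
-- # Returns [] on empty input (A raises IndexError there).
-- definitions = ["letter", "digit", "digits"]
--
-- _OPS = ('*', '+', '|', '$')
-- _OPS_BR = ('*', '+', '|', '$', '(', ')')
--
-- def _needs_concat(p, t):
--     return ((p in _OPS and t in _OPS)
--             or (t == '(' and p != '|')
--             or (p == ')' and t not in _OPS)
--             or (p not in _OPS_BR and t not in _OPS_BR)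
--             or (p in ('*', '+') and t not in ('|', ')')))
--
-- def _tokens(s):
--     toks = []
--     i = 0
--     n = len(s)
--     while i < n:
--         tok = s[i]
--         for d in ("digits", "letter", "digit"):  # longest first
--             if s.startswith(d, i):
--                 tok = d
--                 break
--         toks.append(tok)
--         i += len(tok)
--     return toks
--
-- def addConcatenation(s):
--     toks = _tokens(s)
--     if not toks:
--         return []
--     ret = [toks[0]]
--     prev = toks[0]
--     for t in toks[1:]:
--         if _needs_concat(prev, t):
--             ret.append('$')
--         ret.append(t)
--         prev = t
--     return ret
-- ===== Notes on version B (the rewrite author's own statement) =====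
-- stated objective: faster
-- what changed: Replaced A's per-position rescan of the whole remaining string (finding the last matching j) plus a second index-driven pass over cur[] with a single O(n) left-to-right pass: a longest-prefix-first greedy tokenizer and a prev-token state machine (boolean predicate) deciding where to insert the concatenation marker.
import Mathlib
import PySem

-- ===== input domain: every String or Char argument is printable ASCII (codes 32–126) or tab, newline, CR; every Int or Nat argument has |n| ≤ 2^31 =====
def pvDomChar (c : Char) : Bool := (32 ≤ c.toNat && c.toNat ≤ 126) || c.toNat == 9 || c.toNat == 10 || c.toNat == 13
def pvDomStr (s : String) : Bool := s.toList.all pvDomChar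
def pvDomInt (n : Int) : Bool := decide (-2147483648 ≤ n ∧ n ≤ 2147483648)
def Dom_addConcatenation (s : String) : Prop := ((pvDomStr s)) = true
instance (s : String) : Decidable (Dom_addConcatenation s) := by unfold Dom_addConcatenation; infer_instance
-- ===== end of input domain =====

-- B is a single O(n) pass (longest-prefix tokenizer + prev-token state machine); A rescans
-- the remaining string at every position and indexes cur[] in a second pass. A raises
-- IndexError on the empty string; that input is excluded by Pre_.

-- ===== PORT A =====
-- the module constant `definitions` as char lists
def pvDefs : List (List Char) :=
  [['l','e','t','t','e','r'], ['d','i','g','i','t'], ['d','i','g','i','t','s']]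

-- isOperator / isOperatorOrBracket: operators.count(c)
def pvIsOp (t : List Char) : Nat := PySem.List.count [['*'],['+'],['|'],['$']] t
def pvIsOpBr (t : List Char) : Nat := PySem.List.count [['*'],['+'],['|'],['$'],['('],[')']] t

-- inner `for j in range(i+1, len(s))` loop computing mx
def pvMxA (cs : List Char) (i : Nat) : Nat :=
  (PySem.List.pyRange ((i : Int) + 1) (cs.length : Int) 1).foldl
    (fun mx j =>
      if 0 < pvDefs.count (PySem.List.slice cs (some (i : Int)) (some (j + 1))) then
        (j + 1).toNat
      else mx) (i + 1)

theorem pvMxA_gt (cs : List Char) (i : Nat) : i < pvMxA cs i := by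
  unfold pvMxA
  have h : ∀ (l : List Int) (m : Nat), i < m → (∀ j ∈ l, (i : Int) ≤ j) →
      i < l.foldl (fun mx j =>
        if 0 < pvDefs.count (PySem.List.slice cs (some (i : Int)) (some (j + 1))) then
          (j + 1).toNat
        else mx) m := by
    intro l
    induction l with
    | nil => intro m hm _; simpa using hm
    | cons a t ih =>
      intro m hm hall
      simp only [List.foldl_cons]
      refine ih _ ?_ (fun j hj => hall j (List.mem_cons_of_mem _ hj))
      have ha := hall a (List.mem_cons_self ..)
      split
      · omega
      · exact hm
  refine h _ _ (by omega) ?_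
  intro j hj
  have := (PySem.List.mem_pyRange_one).1 hj
  omega

-- `while i < len(s)` tokenizer loop of A
def pvTokA (cs : List Char) (i : Nat) : List (List Char) :=
  if _h : i < cs.length then
    PySem.List.slice cs (some (i : Int)) (some ((pvMxA cs i : Nat) : Int)) ::
      pvTokA cs (pvMxA cs i)
  else []
termination_by cs.length - i
decreasing_by
  have := pvMxA_gt cs i
  omega

-- one iteration of A's `for i in range(1, len(cur))` loop body
def pvStepA (ret : List (List Char)) (t : List Char) : List (List Char) :=
  let last := PySem.List.pyGetD ret (-1) []
  let ret' :=
    if 0 < pvIsOp last ∧ 0 < pvIsOp t then ret ++ [['$']]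
    else if t = ['('] ∧ last ≠ ['|'] then ret ++ [['$']]
    else if last = [')'] ∧ pvIsOp t = 0 then ret ++ [['$']]
    else if pvIsOpBr last = 0 ∧ pvIsOpBr t = 0 then ret ++ [['$']]
    else if (last = ['*'] ∨ last = ['+']) ∧ (t ≠ ['|'] ∧ t ≠ [')']) then ret ++ [['$']]
    else ret
  ret' ++ [t]

def addConcatenation (s : String) : List String :=
  let cur := pvTokA s.toList 0
  match cur with
  | [] => []  -- Python raises IndexError (cur[0]) here; excluded by Pre_
  | c0 :: _ =>
    ((PySem.List.pyRange 1 (cur.length : Int) 1).foldl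
        (fun ret j => pvStepA ret (PySem.List.pyGetD cur j [])) [c0]).map
      (fun t => String.ofList t)

-- ===== PORT B =====
def pvDigitsL : List Char := ['d','i','g','i','t','s']
def pvLetterL : List Char := ['l','e','t','t','e','r']
def pvDigitL : List Char := ['d','i','g','i','t']

-- greedy token at the front: longest definition prefix, else one char
def pvFrontTok (cs : List Char) : List Char :=
  if pvDigitsL.isPrefixOf cs then pvDigitsL
  else if pvLetterL.isPrefixOf cs then pvLetterL
  else if pvDigitL.isPrefixOf cs then pvDigitL
  else cs.take 1

theorem pvFrontTok_len_pos (c : Char) (r : List Char) : 0 < (pvFrontTok (c :: r)).length := by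
  unfold pvFrontTok
  split_ifs <;> simp [pvDigitsL, pvLetterL, pvDigitL]

def pvTokB : List Char → List (List Char)
  | [] => []
  | c :: r =>
    let t := pvFrontTok (c :: r)
    t :: pvTokB ((c :: r).drop t.length)
termination_by cs => cs.length
decreasing_by
  have := pvFrontTok_len_pos c r
  have h2 : (c :: r).length = r.length + 1 := by simp
  simp only [List.length_drop, h2]
  omega

def pvOps : List (List Char) := [['*'],['+'],['|'],['$']]
def pvOpsBr : List (List Char) := [['*'],['+'],['|'],['$'],['('],[')']]

def pvNeed (p t : List Char) : Bool :=
  (decide (p ∈ pvOps) && decide (t ∈ pvOps)) ||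
  (decide (t = ['(']) && !decide (p = ['|'])) ||
  (decide (p = [')']) && !decide (t ∈ pvOps)) ||
  (!decide (p ∈ pvOpsBr) && !decide (t ∈ pvOpsBr)) ||
  ((decide (p = ['*']) || decide (p = ['+'])) && !(decide (t = ['|']) || decide (t = [')'])))

def addConcatenation_alt (s : String) : List String :=
  match pvTokB s.toList with
  | [] => []
  | t0 :: rest =>
    (rest.foldl
        (fun (st : List (List Char) × List Char) t =>
          (st.1 ++ (if pvNeed st.2 t then [['$'], t] else [t]), t))
        ([t0], t0)).1.map (fun t => String.ofList t)

-- ===== PRECONDITION & SPEC =====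
-- A raises IndexError (cur[0]) on the empty string; that is the only input excluded.
def Pre_addConcatenation (s : String) : Prop := s ≠ ""
instance (s : String) : Decidable (Pre_addConcatenation s) := by unfold Pre_addConcatenation; infer_instance
def pvWitness_addConcatenation : String := "ab*"

def Spec_addConcatenation (s : String) (out : List String) : Prop := out = addConcatenation_alt s
instance (s : String) (out : List String) : Decidable (Spec_addConcatenation s out) := by unfold Spec_addConcatenation; infer_instance

-- ===== CLAIM (what is proved, stated in full; the proofs are below) =====
def Claim_equal_addConcatenation : Prop := ∀ (s : String), Dom_addConcatenation s → Pre_addConcatenation s → Spec_addConcatenation s (addConcatenation s)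

-- ===== LEMMAS AND PROOFS =====

-- membership/length facts about the token alphabet
theorem count_defs_zero (x : List Char) (h5 : x.length ≠ 5) (h6 : x.length ≠ 6) :
    pvDefs.count x = 0 := by
  rw [List.count_eq_zero]
  intro hx
  simp only [pvDefs, List.mem_cons, List.not_mem_nil, or_false] at hx
  rcases hx with h | h | h <;> subst h <;> simp at h5 h6

-- A's inner `for j` loop does nothing on a stretch of indices where no definition matches
theorem foldA_noop (cs : List Char) (i : Nat) (l : List Int) (m : Nat)
    (h : ∀ j ∈ l, pvDefs.count (PySem.List.slice cs (some (i : Int)) (some (j + 1))) = 0) :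
    l.foldl (fun mx j =>
      if 0 < pvDefs.count (PySem.List.slice cs (some (i : Int)) (some (j + 1))) then
        (j + 1).toNat
      else mx) m = m := by
  induction l generalizing m with
  | nil => rfl
  | cons a tl ih =>
    simp only [List.foldl_cons]
    rw [if_neg (by rw [h a (List.mem_cons_self ..)]; omega)]
    exact ih m (fun j hj => h j (List.mem_cons_of_mem _ hj))

theorem slice_take (cs : List Char) (i k : Nat) :
    PySem.List.slice cs (some (i : Int)) (some ((i : Int) + (k : Int))) = (cs.drop i).take k :=
  PySem.List.slice_natCast_add cs i k

-- no definition matches at a length < 5 or > 6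
theorem count_slice_zero (cs : List Char) (i : Nat) (j : Int)
    (hlo : (i : Int) < j)
    (hcond : j < (i : Int) + 4 ∨ ((i : Int) + 6 ≤ j ∧ j < (cs.length : Int))) :
    pvDefs.count (PySem.List.slice cs (some (i : Int)) (some (j + 1))) = 0 := by
  have hk : j + 1 = (i : Int) + (((j + 1 - i).toNat : Nat) : Int) := by omega
  rw [hk, slice_take]
  apply count_defs_zero <;>
    (rw [List.length_take, List.length_drop]; omega)

theorem mxtok (cs : List Char) (i : Nat) (hi : i < cs.length) :
    pvMxA cs i = i + (pvFrontTok (cs.drop i)).length ∧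
    PySem.List.slice cs (some (i : Int)) (some ((pvMxA cs i : Int))) = pvFrontTok (cs.drop i) := by
  have hpt : ∀ d : List Char, d.isPrefixOf (cs.drop i) = true ↔ d = (cs.drop i).take d.length := by
    intro d; rw [List.isPrefixOf_iff_prefix, List.prefix_iff_eq_take]
  have hrlen : (cs.drop i).length = cs.length - i := List.length_drop
  -- characterisations of a match at length 5 / 6 (valid when 5 resp. 6 ≤ (cs.drop i).length)
  have e5 : 5 ≤ cs.length - i →
      ((0 < pvDefs.count ((cs.drop i).take 5)) ↔ pvDigitL.isPrefixOf (cs.drop i) = true) := by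
    intro h5
    have hlen : ((cs.drop i).take 5).length = 5 := by rw [List.length_take, hrlen]; omega
    rw [List.count_pos_iff]
    constructor
    · intro hm
      rw [hpt]
      simp only [pvDefs, List.mem_cons, List.not_mem_nil, or_false] at hm
      rcases hm with h | h | h
      · exact absurd (congrArg List.length h.symm) (by rw [hlen]; simp)
      · rw [show pvDigitL.length = 5 by simp [pvDigitL]]; exact h.symm
      · exact absurd (congrArg List.length h.symm) (by rw [hlen]; simp)
    · intro hp
      rw [hpt, show pvDigitL.length = 5 by simp [pvDigitL]] at hp
      rw [← hp]
      simp [pvDefs, pvDigitL]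
  have e6 : 6 ≤ cs.length - i →
      ((0 < pvDefs.count ((cs.drop i).take 6)) ↔
        (pvDigitsL.isPrefixOf (cs.drop i) = true ∨ pvLetterL.isPrefixOf (cs.drop i) = true)) := by
    intro h6
    have hlen : ((cs.drop i).take 6).length = 6 := by rw [List.length_take, hrlen]; omega
    rw [List.count_pos_iff]
    constructor
    · intro hm
      simp only [pvDefs, List.mem_cons, List.not_mem_nil, or_false] at hm
      rcases hm with h | h | h
      · exact Or.inr (by rw [hpt, show pvLetterL.length = 6 by simp [pvLetterL]]; exact h.symm)
      · exact absurd (congrArg List.length h.symm) (by rw [hlen]; simp)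
      · exact Or.inl (by rw [hpt, show pvDigitsL.length = 6 by simp [pvDigitsL]]; exact h.symm)
    · intro hp
      rcases hp with hp | hp
      · rw [hpt, show pvDigitsL.length = 6 by simp [pvDigitsL]] at hp
        rw [← hp]; simp [pvDefs, pvDigitsL]
      · rw [hpt, show pvLetterL.length = 6 by simp [pvLetterL]] at hp
        rw [← hp]; simp [pvDefs, pvLetterL]
  by_cases hc1 : cs.length ≤ i + 4
  · -- fewer than 5 characters remain: single-character token
    have hmx : pvMxA cs i = i + 1 := by
      unfold pvMxA
      exact foldA_noop cs i _ _ (fun j hj => by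
        have := (PySem.List.mem_pyRange_one).1 hj
        exact count_slice_zero cs i j (by omega) (Or.inl (by omega)))
    have hft : pvFrontTok (cs.drop i) = (cs.drop i).take 1 := by
      unfold pvFrontTok
      rw [if_neg, if_neg, if_neg]
      · intro hp
        have := List.IsPrefix.length_le (List.isPrefixOf_iff_prefix.1 hp)
        simp [pvDigitL, hrlen] at this; omega
      · intro hp
        have := List.IsPrefix.length_le (List.isPrefixOf_iff_prefix.1 hp)
        simp [pvLetterL, hrlen] at this; omega
      · intro hp
        have := List.IsPrefix.length_le (List.isPrefixOf_iff_prefix.1 hp)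
        simp [pvDigitsL, hrlen] at this; omega
    refine ⟨by rw [hmx, hft, List.length_take, hrlen]; omega, ?_⟩
    rw [hmx, hft, show ((i + 1 : Nat) : Int) = (i : Int) + ((1 : Nat) : Int) by push_cast; ring,
      slice_take]
  · by_cases hc2 : cs.length ≤ i + 5
    · -- exactly 5 characters remain
      have hn5 : cs.length = i + 5 := by omega
      have hsplit : PySem.List.pyRange ((i : Int) + 1) (cs.length : Int) 1 =
          PySem.List.pyRange ((i : Int) + 1) ((i : Int) + 4) 1 ++ [(i : Int) + 4] := by
        rw [PySem.List.pyRange_one_append ((i : Int) + 1) ((i : Int) + 4) (cs.length : Int)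
          (by omega) (by omega)]
        congr 1
        rw [PySem.List.pyRange_one_cons (by omega), PySem.List.pyRange_one_eq_nil (by omega)]
      have hne6 : pvDigitsL.isPrefixOf (cs.drop i) = false := by
        rw [Bool.eq_false_iff]; intro hp
        have := List.IsPrefix.length_le (List.isPrefixOf_iff_prefix.1 hp)
        simp [pvDigitsL, hrlen] at this; omega
      have hne6' : pvLetterL.isPrefixOf (cs.drop i) = false := by
        rw [Bool.eq_false_iff]; intro hp
        have := List.IsPrefix.length_le (List.isPrefixOf_iff_prefix.1 hp)
        simp [pvLetterL, hrlen] at this; omega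
      have hmx : pvMxA cs i =
          if 0 < pvDefs.count ((cs.drop i).take 5) then i + 5 else i + 1 := by
        unfold pvMxA
        rw [hsplit, List.foldl_append]
        rw [foldA_noop cs i (PySem.List.pyRange ((i : Int) + 1) ((i : Int) + 4) 1) _
          (fun j hj => by
          have := (PySem.List.mem_pyRange_one).1 hj
          exact count_slice_zero cs i j (by omega) (Or.inl (by omega)))]
        simp only [List.foldl_cons, List.foldl_nil]
        rw [show (i : Int) + 4 + 1 = (i : Int) + ((5 : Nat) : Int) by push_cast; ring, slice_take]
        split_ifs
        · omega
        · rfl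
      unfold pvFrontTok
      rw [hne6, hne6']
      simp only [Bool.false_eq_true, if_false]
      by_cases hP5 : pvDigitL.isPrefixOf (cs.drop i) = true
      · rw [if_pos hP5]
        have hc : 0 < pvDefs.count ((cs.drop i).take 5) := (e5 (by omega)).2 hP5
        rw [hmx, if_pos hc]
        refine ⟨by simp [pvDigitL], ?_⟩
        rw [show ((i + 5 : Nat) : Int) = (i : Int) + ((5 : Nat) : Int) by push_cast; ring,
          slice_take]
        rw [hpt, show pvDigitL.length = 5 by simp [pvDigitL]] at hP5
        exact hP5.symm
      · rw [if_neg hP5]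
        have hc : ¬ 0 < pvDefs.count ((cs.drop i).take 5) := fun hc => hP5 ((e5 (by omega)).1 hc)
        rw [hmx, if_neg hc]
        refine ⟨by rw [List.length_take, hrlen]; omega, ?_⟩
        rw [show ((i + 1 : Nat) : Int) = (i : Int) + ((1 : Nat) : Int) by push_cast; ring,
          slice_take]
    · -- at least 6 characters remain
      have hn6 : i + 6 ≤ cs.length := by omega
      have hsplit : PySem.List.pyRange ((i : Int) + 1) (cs.length : Int) 1 =
          (PySem.List.pyRange ((i : Int) + 1) ((i : Int) + 4) 1 ++ [(i : Int) + 4, (i : Int) + 5])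
            ++ PySem.List.pyRange ((i : Int) + 6) (cs.length : Int) 1 := by
        rw [PySem.List.pyRange_one_append ((i : Int) + 1) ((i : Int) + 6) (cs.length : Int)
          (by omega) (by omega)]
        congr 1
        rw [PySem.List.pyRange_one_append ((i : Int) + 1) ((i : Int) + 4) ((i : Int) + 6)
          (by omega) (by omega)]
        congr 1
        rw [PySem.List.pyRange_one_cons (by omega)]
        rw [show (i : Int) + 4 + 1 = (i : Int) + 5 by ring]
        rw [PySem.List.pyRange_one_cons (by omega)]
        rw [show (i : Int) + 5 + 1 = (i : Int) + 6 by ring]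
        rw [PySem.List.pyRange_one_eq_nil (by omega)]
      have hmx : pvMxA cs i =
          if 0 < pvDefs.count ((cs.drop i).take 6) then i + 6
          else if 0 < pvDefs.count ((cs.drop i).take 5) then i + 5 else i + 1 := by
        unfold pvMxA
        rw [hsplit, List.foldl_append, List.foldl_append]
        rw [foldA_noop cs i (PySem.List.pyRange ((i : Int) + 6) (cs.length : Int) 1) _
          (fun j hj => by
            have := (PySem.List.mem_pyRange_one).1 hj
            exact count_slice_zero cs i j (by omega) (Or.inr ⟨by omega, by omega⟩))]
        rw [foldA_noop cs i (PySem.List.pyRange ((i : Int) + 1) ((i : Int) + 4) 1) _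
          (fun j hj => by
          have := (PySem.List.mem_pyRange_one).1 hj
          exact count_slice_zero cs i j (by omega) (Or.inl (by omega)))]
        simp only [List.foldl_cons, List.foldl_nil]
        rw [show (i : Int) + 4 + 1 = (i : Int) + ((5 : Nat) : Int) by push_cast; ring, slice_take]
        rw [show (i : Int) + 5 + 1 = (i : Int) + ((6 : Nat) : Int) by push_cast; ring, slice_take]
        split_ifs <;> omega
      by_cases hP6 : (0 < pvDefs.count ((cs.drop i).take 6))
      · have hor := (e6 (by omega)).1 hP6
        rw [hmx, if_pos hP6]
        have htake : (cs.drop i).take 6 = pvFrontTok (cs.drop i) := by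
          unfold pvFrontTok
          by_cases hd : pvDigitsL.isPrefixOf (cs.drop i) = true
          · rw [if_pos hd]
            rw [hpt, show pvDigitsL.length = 6 by simp [pvDigitsL]] at hd
            exact hd.symm
          · have hl : pvLetterL.isPrefixOf (cs.drop i) = true := by tauto
            rw [if_neg hd, if_pos hl]
            rw [hpt, show pvLetterL.length = 6 by simp [pvLetterL]] at hl
            exact hl.symm
        have hlen : (pvFrontTok (cs.drop i)).length = 6 := by
          rw [← htake, List.length_take, hrlen]; omega
        refine ⟨by omega, ?_⟩
        rw [show ((i + 6 : Nat) : Int) = (i : Int) + ((6 : Nat) : Int) by push_cast; ring,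
          slice_take, htake]
      · have hnor := fun h => hP6 ((e6 (by omega)).2 h)
        have hd : pvDigitsL.isPrefixOf (cs.drop i) = false := by
          rw [Bool.eq_false_iff]; exact fun h => hnor (Or.inl h)
        have hl : pvLetterL.isPrefixOf (cs.drop i) = false := by
          rw [Bool.eq_false_iff]; exact fun h => hnor (Or.inr h)
        unfold pvFrontTok
        rw [hd, hl]
        simp only [Bool.false_eq_true, if_false]
        by_cases hP5 : pvDigitL.isPrefixOf (cs.drop i) = true
        · rw [if_pos hP5]
          have hc : 0 < pvDefs.count ((cs.drop i).take 5) := (e5 (by omega)).2 hP5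
          rw [hmx, if_neg hP6, if_pos hc]
          refine ⟨by simp [pvDigitL], ?_⟩
          rw [show ((i + 5 : Nat) : Int) = (i : Int) + ((5 : Nat) : Int) by push_cast; ring,
            slice_take]
          rw [hpt, show pvDigitL.length = 5 by simp [pvDigitL]] at hP5
          exact hP5.symm
        · rw [if_neg hP5]
          have hc : ¬ 0 < pvDefs.count ((cs.drop i).take 5) := fun hc => hP5 ((e5 (by omega)).1 hc)
          rw [hmx, if_neg hP6, if_neg hc]
          refine ⟨by rw [List.length_take, hrlen]; omega, ?_⟩
          rw [show ((i + 1 : Nat) : Int) = (i : Int) + ((1 : Nat) : Int) by push_cast; ring,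
            slice_take]

-- the two tokenizers agree
theorem tokA_eq_tokB (cs : List Char) : ∀ (k i : Nat), cs.length ≤ i + k →
    pvTokA cs i = pvTokB (cs.drop i) := by
  intro k
  induction k with
  | zero =>
    intro i hik
    rw [pvTokA, dif_neg (by omega), List.drop_of_length_le (by omega), pvTokB]
  | succ k ih =>
    intro i hik
    rw [pvTokA]
    by_cases hi : i < cs.length
    · rw [dif_pos hi]
      obtain ⟨hmx, htok⟩ := mxtok cs i hi
      have hrne : cs.drop i ≠ [] := by
        intro h
        have := congrArg List.length h
        simp at this; omega
      obtain ⟨c, r', hcr⟩ := List.exists_cons_of_ne_nil hrne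
      have htail : pvTokA cs (pvMxA cs i) =
          pvTokB ((cs.drop i).drop (pvFrontTok (cs.drop i)).length) := by
        rw [ih (pvMxA cs i) (by have := pvMxA_gt cs i; omega), hmx, ← List.drop_drop]
      rw [hcr, pvTokB, ← hcr, htok, htail]
    · rw [dif_neg hi, List.drop_of_length_le (by omega), pvTokB]

-- A's branch cascade body equals "append '$' iff pvNeed, then the token"
theorem stepA_eq (ret : List (List Char)) (t : List Char) (h : ret ≠ []) :
    pvStepA ret t = ret ++ (if pvNeed (ret.getLast h) t then [['$'], t] else [t]) := by
  unfold pvStepA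
  simp only [PySem.List.pyGetD_neg_one ret [] h]
  have hop : ∀ x : List Char, 0 < pvIsOp x ↔ x ∈ pvOps := by
    intro x; simp [pvIsOp, pvOps, PySem.List.count_eq, List.count_pos_iff]
  have hopz : ∀ x : List Char, pvIsOp x = 0 ↔ x ∉ pvOps := by
    intro x; simp [pvIsOp, pvOps, PySem.List.count_eq, List.count_eq_zero]
  have hbrz : ∀ x : List Char, pvIsOpBr x = 0 ↔ x ∉ pvOpsBr := by
    intro x; simp [pvIsOpBr, pvOpsBr, PySem.List.count_eq, List.count_eq_zero]
  set last := ret.getLast h with hlast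
  have e1 : ((decide (last ∈ pvOps) && decide (t ∈ pvOps)) = true) ↔
      (0 < pvIsOp last ∧ 0 < pvIsOp t) := by simp [hop]
  have e2 : ((decide (t = ['(']) && !decide (last = ['|'])) = true) ↔
      (t = ['('] ∧ last ≠ ['|']) := by simp
  have e3 : ((decide (last = [')']) && !decide (t ∈ pvOps)) = true) ↔
      (last = [')'] ∧ pvIsOp t = 0) := by simp [hopz]
  have e4 : ((!decide (last ∈ pvOpsBr) && !decide (t ∈ pvOpsBr)) = true) ↔
      (pvIsOpBr last = 0 ∧ pvIsOpBr t = 0) := by simp [hbrz]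
  have e5 : (((decide (last = ['*']) || decide (last = ['+'])) &&
        !(decide (t = ['|']) || decide (t = [')']))) = true) ↔
      ((last = ['*'] ∨ last = ['+']) ∧ (t ≠ ['|'] ∧ t ≠ [')'])) := by
    simp
  have hiff : pvNeed last t = true ↔
      ((0 < pvIsOp last ∧ 0 < pvIsOp t) ∨ (t = ['('] ∧ last ≠ ['|']) ∨
       (last = [')'] ∧ pvIsOp t = 0) ∨ (pvIsOpBr last = 0 ∧ pvIsOpBr t = 0) ∨
       ((last = ['*'] ∨ last = ['+']) ∧ (t ≠ ['|'] ∧ t ≠ [')']))) := by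
    rw [pvNeed, Bool.or_eq_true, Bool.or_eq_true, Bool.or_eq_true, Bool.or_eq_true,
      e1, e2, e3, e4, e5]
    rw [or_assoc, or_assoc, or_assoc]
  by_cases hn : pvNeed last t = true
  · rw [if_pos hn]
    rw [hiff] at hn
    split_ifs with h1 h2 h3 h4 h5
    · simp
    · simp
    · simp
    · simp
    · simp
    · rcases hn with hA | hB | hC | hD | hE <;> contradiction
  · rw [if_neg hn]
    rw [hiff] at hn
    split_ifs with h1 h2 h3 h4 h5
    · exact absurd (Or.inl h1) hn
    · exact absurd (Or.inr (Or.inl h2)) hn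
    · exact absurd (Or.inr (Or.inr (Or.inl h3))) hn
    · exact absurd (Or.inr (Or.inr (Or.inr (Or.inl h4)))) hn
    · exact absurd (Or.inr (Or.inr (Or.inr (Or.inr h5)))) hn
    · simp

-- A's index-driven '$'-insertion loop equals B's prev-state fold
theorem phase2_eq : ∀ (rest acc : List (List Char)) (prev : List Char) (h : acc ≠ [])
    (_ : acc.getLast h = prev),
    rest.foldl pvStepA acc =
      (rest.foldl
        (fun (st : List (List Char) × List Char) t =>
          (st.1 ++ (if pvNeed st.2 t then [['$'], t] else [t]), t)) (acc, prev)).1 := by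
  intro rest
  induction rest with
  | nil => intro acc prev h hl; rfl
  | cons t rs ih =>
    intro acc prev h hl
    simp only [List.foldl_cons]
    rw [stepA_eq acc t h, hl]
    have hne : acc ++ (if pvNeed prev t = true then [['$'], t] else [t]) ≠ [] := by
      split <;> simp
    have hl2 : (acc ++ (if pvNeed prev t = true then [['$'], t] else [t])).getLast? = some t := by
      split
      · rw [show acc ++ [['$'], t] = (acc ++ [['$']]) ++ [t] by simp, List.getLast?_concat]
      · rw [List.getLast?_concat]
    exact ih _ t hne (by
      have hg := List.getLast?_eq_some_getLast hne
      rw [hg] at hl2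
      exact Option.some.inj hl2)

-- ===== VERDICT (by name: the statement is the Claim_ definition above) =====
theorem addConcatenation_spec : Claim_equal_addConcatenation := by
  unfold Claim_equal_addConcatenation Spec_addConcatenation
  intro s _ _
  unfold addConcatenation addConcatenation_alt
  have htok : pvTokA s.toList 0 = pvTokB s.toList := by
    have h := tokA_eq_tokB s.toList s.toList.length 0 (by omega)
    rwa [List.drop_zero] at h
  rw [htok]
  cases hcur : pvTokB s.toList with
  | nil => rfl
  | cons t0 rest =>
    simp only
    rw [PySem.List.foldl_pyRange_pyGetD' (t0 :: rest) ([] : List Char) pvStepA [t0]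
      (by omega : (0 : Int) ≤ 1)]
    congr 1
    rw [show ((1 : Int).toNat) = 1 from rfl, List.drop_one, List.tail_cons]
    exact phase2_eq rest [t0] t0 (by simp) (by simp)
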